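-- pv_equiv track=rewrite | github.com/duc180701/Code_PTIT | Python/PY01055-soxenke.py | check_in_odd_position
-- ===== SOURCE A (Python) =====
-- def check_in_odd_position(s):
--     for i in range(2, len(s), 2):
--         if s[i] !=  s[i - 2]:
--             return False
--     if len(s) % 2 == 0:
--         if s[len(s) - 1] == s[len(s) - 3]:
--             return True
--         else:
--             return False
--     return True
-- ===== SOURCE B (Python) =====
-- def check_in_odd_position(s):
--     if len(set(s[::2])) > 1:
--         return False
--     if len(s) % 2 == 0:
--         return s[len(s) - 1] == s[len(s) - 3]
--     return True
-- ===== Notes on version B (the rewrite author's own statement) =====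
-- stated objective: simpler
-- what changed: Replaces A's index-stepping pairwise short-circuit loop with a collect-then-count test: take the even-index slice s[::2] once and reject when it holds more than one distinct character; the even-length tail check is kept verbatim.
import Mathlib
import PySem

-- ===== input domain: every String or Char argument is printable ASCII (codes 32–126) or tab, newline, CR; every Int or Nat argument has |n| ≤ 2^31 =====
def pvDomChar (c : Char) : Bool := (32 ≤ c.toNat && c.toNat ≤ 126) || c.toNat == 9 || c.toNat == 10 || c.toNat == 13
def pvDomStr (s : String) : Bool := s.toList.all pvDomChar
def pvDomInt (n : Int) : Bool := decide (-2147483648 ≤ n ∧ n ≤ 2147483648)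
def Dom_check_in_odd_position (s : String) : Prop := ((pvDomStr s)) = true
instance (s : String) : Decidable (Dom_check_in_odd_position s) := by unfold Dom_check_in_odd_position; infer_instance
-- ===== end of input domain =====

-- B replaces A's index-stepping pairwise loop by a collect-then-count test on the even-index
-- slice (set cardinality); objective: simpler. Pre_ excludes only the empty string, where
-- both Pythons raise IndexError (s[-1]).


-- ===== PORT A =====
-- the 'for i in range(2, len(s), 2): if s[i] != s[i-2]: return False' loop
def aLoop (cs : List Char) : List Int → Bool
  | [] => true
  | i :: rest =>
      if PySem.List.pyGet? cs i ≠ PySem.List.pyGet? cs (i - 2) then false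
      else aLoop cs rest

def check_in_odd_position (s : String) : Bool :=
  let cs := s.toList
  let n : Int := cs.length
  if ! aLoop cs (PySem.List.pyRange 2 n 2) then false
  else if n % 2 == 0 then
    (if PySem.List.pyGet? cs (n - 1) = PySem.List.pyGet? cs (n - 3) then true else false)
  else true

-- ===== PORT B =====
def check_in_odd_position_alt (s : String) : Bool :=
  let cs := s.toList
  let n : Int := cs.length
  -- e = s[::2]; step 2 ≠ 0, so slice? is always 'some' and .getD [] is exact
  let e := (PySem.List.slice? cs none none 2).getD []
  if 1 < PySem.Set.len (PySem.Set.ofList e) then false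
  else if n % 2 == 0 then
    (PySem.List.pyGet? cs (n - 1) == PySem.List.pyGet? cs (n - 3))
  else true

-- ===== PRECONDITION & SPEC =====
-- Pre_ excludes exactly the empty string: there Python A (and B) raise IndexError on s[-1].
def Pre_check_in_odd_position (s : String) : Prop := s ≠ ""
instance (s : String) : Decidable (Pre_check_in_odd_position s) := by
  unfold Pre_check_in_odd_position; infer_instance

def pvWitness_check_in_odd_position : String := "aba"

def Spec_check_in_odd_position (s : String) (out : Bool) : Prop := out = check_in_odd_position_alt s
instance (s : String) (out : Bool) : Decidable (Spec_check_in_odd_position s out) := by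
  unfold Spec_check_in_odd_position; infer_instance

-- ===== CLAIM (what is proved, stated in full; the proofs are below) =====
def Claim_equal_check_in_odd_position : Prop := ∀ (s : String), Dom_check_in_odd_position s → Pre_check_in_odd_position s → Spec_check_in_odd_position s (check_in_odd_position s)

-- ===== LEMMAS AND PROOFS =====

-- the loop falls through iff every sampled pair of even-index chars agrees
theorem aLoop_eq_true_iff (cs : List Char) (l : List Int) :
    aLoop cs l = true ↔
      ∀ i ∈ l, PySem.List.pyGet? cs i = PySem.List.pyGet? cs (i - 2) := by
  induction l with
  | nil => simp [aLoop]
  | cons i rest ih =>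
      by_cases h : PySem.List.pyGet? cs i = PySem.List.pyGet? cs (i - 2) <;>
        simp [aLoop, h, ih]

-- membership in the even-index slice s[::2]
theorem mem_evens_iff (cs : List Char) (x : Char) :
    x ∈ (PySem.List.slice? cs none none 2).getD [] ↔
      ∃ k : Nat, 2 * k < cs.length ∧ cs[2 * k]? = some x := by
  have h2 : (2 : Int) ≠ 0 := by norm_num
  simp only [PySem.List.slice?, PySem.List.sliceIndices, if_neg h2]
  norm_num
  constructor
  · rintro ⟨k, hk, hx⟩
    rcases List.getElem?_eq_some_iff.mp hx with ⟨hlt, rfl⟩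
    refine ⟨k, ?_, ?_⟩
    · have : ((2 : Int) * k).toNat = 2 * k := by omega
      omega
    · have : ((2 : Int) * k).toNat = 2 * k := by omega
      rw [← this]; exact List.getElem?_eq_getElem hlt
  · rintro ⟨k, hk, hx⟩
    refine ⟨k, ?_, ?_⟩
    · split
      · omega
      · omega
    · have : ((2 : Int) * k).toNat = 2 * k := by omega
      rw [this]; exact hx

-- a duplicate-free list has length ≤ 1 iff all its elements coincide
theorem nodup_len_le_one_iff (l : List Char) (hnd : l.Nodup) :
    l.length ≤ 1 ↔ ∀ x ∈ l, ∀ y ∈ l, x = y := by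
  match l with
  | [] => simp
  | [a] => simp
  | a :: b :: t =>
      simp only [List.length_cons]
      constructor
      · omega
      · intro h
        exfalso
        have hab : a = b := h a (by simp) b (by simp)
        have := (List.nodup_cons.mp hnd).1
        simp [hab] at this
  termination_by l.length

-- the bridge: the chain condition of A's loop holds iff the even-index chars are all equal
theorem bridge (cs : List Char) :
    (∀ i ∈ PySem.List.pyRange 2 (cs.length : Int) 2,
        PySem.List.pyGet? cs i = PySem.List.pyGet? cs (i - 2)) ↔
      (∀ x ∈ (PySem.List.slice? cs none none 2).getD [],
       ∀ y ∈ (PySem.List.slice? cs none none 2).getD [], x = y) := by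
  have hmem : ∀ i : Int, i ∈ PySem.List.pyRange 2 (cs.length : Int) 2 ↔
      2 ≤ i ∧ i < (cs.length : Int) ∧ (2 : Int) ∣ i - 2 := by
    intro i; exact PySem.List.mem_pyRange_iff_of_pos (by norm_num) i
  constructor
  · intro h x hx y hy
    -- chain ⇒ every even-index char equals cs.getD 0 default
    have step : ∀ k : Nat, 2 * k + 2 < cs.length →
        cs.getD (2 * k + 2) default = cs.getD (2 * k) default := by
      intro k hk
      have hi : ((2 * k + 2 : Nat) : Int) ∈ PySem.List.pyRange 2 (cs.length : Int) 2 := by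
        rw [hmem]
        refine ⟨by push_cast; omega, by push_cast; omega, ⟨k, by push_cast; ring⟩⟩
      have := h _ hi
      have e1 : PySem.List.pyGet? cs ((2 * k + 2 : Nat) : Int) = cs[2 * k + 2]? := by
        simpa using PySem.List.pyGet?_natCast cs (2 * k + 2)
      have e2 : PySem.List.pyGet? cs (((2 * k + 2 : Nat) : Int) - 2) = cs[2 * k]? := by
        have : ((2 * k + 2 : Nat) : Int) - 2 = ((2 * k : Nat) : Int) := by push_cast; ring
        rw [this]; simpa using PySem.List.pyGet?_natCast cs (2 * k)
      rw [e1, e2] at this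
      rw [List.getD_eq_getElem?_getD, List.getD_eq_getElem?_getD, this]
    have aux : ∀ k : Nat, 2 * k < cs.length →
        cs.getD (2 * k) default = cs.getD 0 default := by
      intro k
      induction k with
      | zero => intro _; rfl
      | succ m ih =>
          intro hk
          have h1 : 2 * m + 2 < cs.length := by omega
          have := step m h1
          have hm : 2 * (m + 1) = 2 * m + 2 := by ring
          rw [hm, this]
          exact ih (by omega)
    rcases (mem_evens_iff cs x).mp hx with ⟨j, hj, hxj⟩
    rcases (mem_evens_iff cs y).mp hy with ⟨j', hj', hyj⟩
    have hx' : x = cs.getD (2 * j) default := by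
      rw [List.getD_eq_getElem?_getD, hxj]; rfl
    have hy' : y = cs.getD (2 * j') default := by
      rw [List.getD_eq_getElem?_getD, hyj]; rfl
    rw [hx', hy', aux j hj, aux j' hj']
  · intro h i hi
    rw [hmem] at hi
    obtain ⟨h2i, hin, k, hk⟩ := hi
    have hk' : i = 2 * k + 2 := by omega
    have hk0 : 0 ≤ k := by omega
    have hxm : cs.getD (2 * k.toNat + 2) default ∈ (PySem.List.slice? cs none none 2).getD [] := by
      rw [mem_evens_iff]
      refine ⟨k.toNat + 1, by omega, ?_⟩
      have hlt : 2 * (k.toNat + 1) < cs.length := by omega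
      rw [List.getD_eq_getElem?_getD, List.getElem?_eq_getElem (by omega : 2 * k.toNat + 2 < cs.length)]
      have : 2 * (k.toNat + 1) = 2 * k.toNat + 2 := by ring
      rw [this, List.getElem?_eq_getElem (by omega : 2 * k.toNat + 2 < cs.length)]
      rfl
    have hym : cs.getD (2 * k.toNat) default ∈ (PySem.List.slice? cs none none 2).getD [] := by
      rw [mem_evens_iff]
      refine ⟨k.toNat, by omega, ?_⟩
      rw [List.getD_eq_getElem?_getD, List.getElem?_eq_getElem (by omega : 2 * k.toNat < cs.length)]
      rfl
    have heq := h _ hxm _ hym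
    have e1 : PySem.List.pyGet? cs i = cs[2 * k.toNat + 2]? := by
      have : i = ((2 * k.toNat + 2 : Nat) : Int) := by omega
      rw [this]; simpa using PySem.List.pyGet?_natCast cs (2 * k.toNat + 2)
    have e2 : PySem.List.pyGet? cs (i - 2) = cs[2 * k.toNat]? := by
      have : i - 2 = ((2 * k.toNat : Nat) : Int) := by omega
      rw [this]; simpa using PySem.List.pyGet?_natCast cs (2 * k.toNat)
    rw [e1, e2,
        List.getElem?_eq_getElem (by omega : 2 * k.toNat + 2 < cs.length),
        List.getElem?_eq_getElem (by omega : 2 * k.toNat < cs.length)]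
    have hxv : cs.getD (2 * k.toNat + 2) default = cs[2 * k.toNat + 2] :=
      List.getD_eq_getElem cs default (by omega)
    have hyv : cs.getD (2 * k.toNat) default = cs[2 * k.toNat] :=
      List.getD_eq_getElem cs default (by omega)
    rw [← hxv, ← hyv, heq]

-- (a == b) as decide (a = b), for rewriting B's beq into A's propositional comparison
theorem beq_decide {α : Type} [DecidableEq α] [BEq α] [LawfulBEq α] (a b : α) :
    (a == b) = decide (a = b) := by
  by_cases h : a = b <;> simp [h]

-- ===== VERDICT (by name: the statement is the Claim_ definition above) =====
theorem check_in_odd_position_spec : Claim_equal_check_in_odd_position := by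
  intro s _ _
  unfold Spec_check_in_odd_position check_in_odd_position check_in_odd_position_alt
  simp only []
  set cs := s.toList with hcs
  set e := (PySem.List.slice? cs none none 2).getD [] with he
  -- the two guards are equivalent
  have hguard : (! aLoop cs (PySem.List.pyRange 2 (cs.length : Int) 2)) =
      decide (1 < PySem.Set.len (PySem.Set.ofList e)) := by
    have hlen : PySem.Set.len (PySem.Set.ofList e) = ((PySem.Set.ofList e).length : Int) := by
      simp [PySem.Set.len]
    by_cases hall : ∀ x ∈ e, ∀ y ∈ e, x = y
    · have h1 : aLoop cs (PySem.List.pyRange 2 (cs.length : Int) 2) = true :=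
        (aLoop_eq_true_iff cs _).mpr ((bridge cs).mpr hall)
      have hall' : ∀ x ∈ PySem.Set.ofList e, ∀ y ∈ PySem.Set.ofList e, x = y := by
        intro x hx y hy
        exact hall x ((PySem.Set.mem_ofList e x).mp hx) y ((PySem.Set.mem_ofList e y).mp hy)
      have hle : (PySem.Set.ofList e).length ≤ 1 :=
        (nodup_len_le_one_iff _ (PySem.Set.nodup_ofList e)).mpr hall'
      have hne : ¬ (1 : Int) < PySem.Set.len (PySem.Set.ofList e) := by
        rw [hlen]; exact_mod_cast Nat.not_lt.mpr hle
      rw [h1, decide_eq_false hne]; rfl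
    · have h1 : aLoop cs (PySem.List.pyRange 2 (cs.length : Int) 2) = false := by
        rcases Bool.eq_false_or_eq_true (aLoop cs (PySem.List.pyRange 2 (cs.length : Int) 2)) with h | h
        · exact absurd ((bridge cs).mp ((aLoop_eq_true_iff cs _).mp h)) hall
        · exact h
      have hall' : ¬ ∀ x ∈ PySem.Set.ofList e, ∀ y ∈ PySem.Set.ofList e, x = y := by
        intro hc
        exact hall (fun x hx y hy =>
          hc x ((PySem.Set.mem_ofList e x).mpr hx) y ((PySem.Set.mem_ofList e y).mpr hy))
      have hgt : 1 < (PySem.Set.ofList e).length := by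
        by_contra hle
        exact hall' ((nodup_len_le_one_iff _ (PySem.Set.nodup_ofList e)).mp (by omega))
      have hlt : (1 : Int) < PySem.Set.len (PySem.Set.ofList e) := by
        rw [hlen]; exact_mod_cast hgt
      rw [h1, decide_eq_true hlt]; rfl
    -- accessory
  rw [hguard]
  simp [beq_decide]
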